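-- pv_equiv track=rewrite | github.com/ting1011/2026-python | weeks/week-04/solutions/0318/10008-easy.py | letter_frequency_easy
-- ===== SOURCE A (Python) =====
-- def letter_frequency_easy(lines: list[str]) -> list[tuple[str, int]]:
--     cnt: dict[str, int] = {}
--     for line in lines:
--         for ch in line:
--             if ch.isalpha():
--                 ch = ch.upper()
--                 cnt[ch] = cnt.get(ch, 0) + 1
--     return sorted(cnt.items(), key=lambda x: (-x[1], x[0]))
-- ===== SOURCE B (Python) =====
-- def _group(letters):
--     # run-length encode a sorted list: [(letter, run length), ...]
--     if not letters:
--         return []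
--     head = letters[0]
--     n = 1
--     while n < len(letters) and letters[n] == head:
--         n += 1
--     return [(head, n)] + _group(letters[n:])
--
--
-- def letter_frequency_easy(lines: list[str]) -> list[tuple[str, int]]:
--     letters = sorted(ch.upper() for line in lines for ch in line if ch.isalpha())
--     pairs = _group(letters)
--     return sorted(pairs, key=lambda p: (-p[1], p[0]))
-- ===== Notes on version B (the rewrite author's own statement) =====
-- stated objective: alternative
-- what changed: A's hash-based dict counting is replaced by sort-then-group counting: sort the flat list of uppercased letters, run-length encode the sorted list into (letter, count) pairs by a recursive grouping helper, then sort the pairs by (-count, letter).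
import Mathlib
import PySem

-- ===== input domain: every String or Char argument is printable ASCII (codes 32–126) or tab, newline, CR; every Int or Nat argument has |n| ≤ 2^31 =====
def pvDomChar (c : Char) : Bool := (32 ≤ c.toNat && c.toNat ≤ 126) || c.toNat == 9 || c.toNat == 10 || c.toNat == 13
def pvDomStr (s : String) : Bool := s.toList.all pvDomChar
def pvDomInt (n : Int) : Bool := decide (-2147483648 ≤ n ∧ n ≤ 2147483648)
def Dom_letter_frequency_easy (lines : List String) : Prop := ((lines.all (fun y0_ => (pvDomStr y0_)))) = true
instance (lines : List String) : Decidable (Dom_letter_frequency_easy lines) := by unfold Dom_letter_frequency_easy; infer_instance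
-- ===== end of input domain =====

-- B replaces A's hash-based dict counting by sort-then-group: sort the flat list of
-- uppercased letters, run-length encode it, then sort the pairs by (-count, letter).

-- ch.upper() for a one-character string ch (exact: PySem.Chars.upper is Python's str.upper)
def pvUp (c : Char) : String := String.ofList (PySem.Chars.upper [c])

-- ===== PORT A =====
def letter_frequency_easy (lines : List String) : List (String × Int) :=
  let cnt : PySem.Dict String Int :=
    lines.foldl (fun d line =>
      line.toList.foldl (fun d ch =>
        if PySem.Chars.isalpha ch then
          let k := pvUp ch
          d.insert k (d.getD k 0 + 1)
        else d) d) PySem.Dict.empty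
  PySem.List.sorted2 cnt.items (fun x => -x.2) (fun x => x.1)

-- ===== PORT B =====
-- Source B's _group: the inner while loop counts the run of elements equal to the head
-- (= the length of the takeWhile prefix) and recurses on letters[n:] (= the dropWhile suffix).
def lfeGroup : List String → List (String × Int)
  | [] => []
  | h :: t =>
    (h, ((t.takeWhile (fun x => x == h)).length : Int) + 1) ::
      lfeGroup (t.dropWhile (fun x => x == h))
termination_by l => l.length
decreasing_by
  simpa [Nat.lt_succ_iff] using List.length_dropWhile_le (fun x => x == h) t

def letter_frequency_easy_alt (lines : List String) : List (String × Int) :=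
  let letters : List String :=
    PySem.List.sorted
      (lines.flatMap (fun line => ((line.toList.filter PySem.Chars.isalpha).map pvUp)))
      (fun x => x) false
  let pairs := lfeGroup letters
  PySem.List.sorted2 pairs (fun p => -p.2) (fun p => p.1)

-- ===== PRECONDITION & SPEC =====
def Spec_letter_frequency_easy (lines : List String) (out : List (String × Int)) : Prop := out = letter_frequency_easy_alt lines
instance (lines : List String) (out : List (String × Int)) : Decidable (Spec_letter_frequency_easy lines out) := by unfold Spec_letter_frequency_easy; infer_instance

-- ===== CLAIM (what is proved, stated in full; the proofs are below) =====
def Claim_equal_letter_frequency_easy : Prop := ∀ (lines : List String), Dom_letter_frequency_easy lines → Spec_letter_frequency_easy lines (letter_frequency_easy lines)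

-- ===== LEMMAS AND PROOFS =====

-- the (-count, letter) lexicographic order on pairs, and sorted2's comparison
def lfeR (a b : String × Int) : Prop := -a.2 < -b.2 ∨ (-a.2 = -b.2 ∧ a.1 ≤ b.1)
def lfeLt (a b : String × Int) : Bool :=
  decide (-a.2 < -b.2) || (!decide (-b.2 < -a.2) && decide (a.1 < b.1))

lemma lfeR_of_lt {a b : String × Int} (h : lfeLt a b = true) : lfeR a b := by
  unfold lfeLt at h; unfold lfeR
  simp only [Bool.or_eq_true, Bool.and_eq_true, Bool.not_eq_true', decide_eq_true_eq,
    decide_eq_false_iff_not] at h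
  rcases h with h | ⟨h1, h2⟩
  · exact Or.inl h
  · by_cases hlt : -a.2 < -b.2
    · exact Or.inl hlt
    · exact Or.inr ⟨by omega, le_of_lt h2⟩

lemma lfeR_of_not_lt {a b : String × Int} (h : lfeLt a b = false) : lfeR b a := by
  unfold lfeLt at h; unfold lfeR
  simp only [Bool.or_eq_false_iff, Bool.and_eq_false_iff, Bool.not_eq_false',
    decide_eq_true_eq, decide_eq_false_iff_not] at h
  rcases h with ⟨h1, h2 | h2⟩
  · exact Or.inl h2
  · by_cases hlt : -b.2 < -a.2
    · exact Or.inl hlt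
    · exact Or.inr ⟨by omega, le_of_not_gt h2⟩

lemma lfeR_trans {a b c : String × Int} (h1 : lfeR a b) (h2 : lfeR b c) : lfeR a c := by
  unfold lfeR at *
  rcases h1 with h1 | ⟨h1, h1'⟩ <;> rcases h2 with h2 | ⟨h2, h2'⟩
  · exact Or.inl (lt_trans h1 h2)
  · exact Or.inl (by omega)
  · exact Or.inl (by omega)
  · exact Or.inr ⟨by omega, le_trans h1' h2'⟩

lemma insertBy_pairwise_lfeR (x : String × Int) (ys : List (String × Int))
    (h : ys.Pairwise lfeR) : (PySem.List.insertBy lfeLt x ys).Pairwise lfeR := by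
  induction ys with
  | nil => simp [PySem.List.insertBy]
  | cons y ys ih =>
    rcases List.pairwise_cons.mp h with ⟨hy, hys⟩
    by_cases hlt : lfeLt x y = true
    · rw [show PySem.List.insertBy lfeLt x (y :: ys) = x :: y :: ys by
        simp [PySem.List.insertBy, hlt]]
      refine List.pairwise_cons.mpr ⟨?_, h⟩
      intro z hz
      rcases List.mem_cons.mp hz with rfl | hz
      · exact lfeR_of_lt hlt
      · exact lfeR_trans (lfeR_of_lt hlt) (hy z hz)
    · rw [show PySem.List.insertBy lfeLt x (y :: ys) =
          y :: PySem.List.insertBy lfeLt x ys by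
        simp [PySem.List.insertBy, hlt]]
      refine List.pairwise_cons.mpr ⟨?_, ih hys⟩
      intro z hz
      rcases (PySem.List.mem_insertBy lfeLt x z ys).mp hz with rfl | hz
      · exact lfeR_of_not_lt (Bool.eq_false_iff.mpr hlt ▸ rfl)
      · exact hy z hz

lemma sorted2_pairwise_lfeR (xs : List (String × Int)) :
    (PySem.List.sorted2 xs (fun p => -p.2) (fun p => p.1)).Pairwise lfeR := by
  show (xs.foldl (fun acc x => PySem.List.insertBy lfeLt x acc) []).Pairwise lfeR
  suffices h : ∀ acc : List (String × Int), acc.Pairwise lfeR →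
      (xs.foldl (fun acc x => PySem.List.insertBy lfeLt x acc) acc).Pairwise lfeR from
    h [] (by simp)
  induction xs with
  | nil => intro acc hacc; simpa using hacc
  | cons x xs ih =>
    intro acc hacc
    exact ih _ (insertBy_pairwise_lfeR x acc hacc)

-- sorted2 with the (-count, letter) keys of two permuted lists agree
lemma sorted2_eq_of_perm {xs ys : List (String × Int)} (h : xs.Perm ys) :
    PySem.List.sorted2 xs (fun p => -p.2) (fun p => p.1)
      = PySem.List.sorted2 ys (fun p => -p.2) (fun p => p.1) := by
  refine List.Perm.eq_of_pairwise (le := lfeR) ?_ (sorted2_pairwise_lfeR xs)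
    (sorted2_pairwise_lfeR ys)
    (((PySem.List.sorted2_perm xs _ _ false).trans h).trans
      (PySem.List.sorted2_perm ys _ _ false).symm)
  intro a b _ _ hab hba
  rcases a with ⟨a1, a2⟩; rcases b with ⟨b1, b2⟩
  unfold lfeR at hab hba
  simp only at hab hba
  have h2 : a2 = b2 := by omega
  have h1 : a1 = b1 := by
    rcases hab with hab | ⟨_, hab⟩ <;> rcases hba with hba | ⟨_, hba⟩ <;>
      first | omega | exact le_antisymm hab hba
  simp [h1, h2]

-- A's nested counting loop builds exactly Counter(ups) for the flat uppercased-letter list ups.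
lemma lfe_fold_eq_counter (lines : List String) :
    lines.foldl (fun d line =>
      line.toList.foldl (fun d ch =>
        if PySem.Chars.isalpha ch then
          let k := pvUp ch
          d.insert k (d.getD k 0 + 1)
        else d) d) PySem.Dict.empty
    = PySem.Dict.counter
        (lines.flatMap (fun line => ((line.toList.filter PySem.Chars.isalpha).map pvUp))) := by
  rw [← PySem.Dict.foldl_insert_getD_add_one_eq_counter, List.foldl_flatMap]
  refine PySem.List.foldl_congr_mem _ _ _ _ (fun d line _ => ?_)
  exact (PySem.List.foldl_if_eq_foldl_filter PySem.Chars.isalpha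
      (fun (d : PySem.Dict String Int) ch => d.insert (pvUp ch) (d.getD (pvUp ch) 0 + 1))
      line.toList d).trans
    (List.foldl_map (f := pvUp)
      (g := fun (d : PySem.Dict String Int) k => d.insert k (d.getD k 0 + 1))
      (l := line.toList.filter PySem.Chars.isalpha) (init := d)).symm

-- every element of the dropWhile suffix of a ≤-sorted list is strictly above the head
lemma dropWhile_gt_head {h : String} {t : List String}
    (hs : (h :: t).Pairwise (· ≤ ·)) :
    ∀ x ∈ t.dropWhile (fun y => y == h), h < x := by
  rcases List.pairwise_cons.mp hs with ⟨hh, ht⟩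
  have hsub : (t.dropWhile (fun y => y == h)).Sublist t := List.dropWhile_sublist _
  have hpw : (t.dropWhile (fun y => y == h)).Pairwise (· ≤ ·) := ht.sublist hsub
  intro x hx
  cases hd : t.dropWhile (fun y => y == h) with
  | nil => simp [hd] at hx
  | cons d ds =>
    have hdne : ¬ (d == h) = true := by
      have := List.head?_dropWhile_not (fun y => y == h) t
      rw [hd] at this; simpa using this
    have hdgt : h < d :=
      lt_of_le_of_ne (hh d (hsub.mem (hd ▸ List.mem_cons_self))) (by simpa using (Ne.symm (by simpa using hdne)))
    rw [hd] at hx hpw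
    rcases List.mem_cons.mp hx with rfl | hx
    · exact hdgt
    · exact lt_of_lt_of_le hdgt ((List.pairwise_cons.mp hpw).1 x hx)

-- run-length encoding of a ≤-sorted list: members are exactly (s, count s)
lemma mem_lfeGroup {l : List String} (hs : l.Pairwise (· ≤ ·)) (p : String × Int) :
    p ∈ lfeGroup l ↔ p.1 ∈ l ∧ p.2 = (l.count p.1 : Int) := by
  induction l using lfeGroup.induct with
  | case1 => simp [lfeGroup]
  | case2 h t ih =>
    have htw : ∀ x ∈ t.takeWhile (fun y => y == h), x = h := by
      intro x hx
      simpa using List.mem_takeWhile_imp hx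
    have hdw := dropWhile_gt_head hs
    have hnot : h ∉ t.dropWhile (fun y => y == h) := fun hmem => absurd (hdw h hmem) (lt_irrefl h)
    have hpwdw : (t.dropWhile (fun y => y == h)).Pairwise (· ≤ ·) :=
      (List.pairwise_cons.mp hs).2.sublist (List.dropWhile_sublist _)
    have hsplit : t = t.takeWhile (fun y => y == h) ++ t.dropWhile (fun y => y == h) :=
      (List.takeWhile_append_dropWhile).symm
    have htsum : ∀ s : String, t.count s
        = (t.takeWhile (fun y => y == h)).count s
          + (t.dropWhile (fun y => y == h)).count s := by
      intro s
      conv_lhs => rw [hsplit]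
      rw [List.count_append]
    have hcount_h : (h :: t).count h =
        (t.takeWhile (fun y => y == h)).length + 1 := by
      rw [List.count_cons_self, htsum]
      have h1 : (t.takeWhile (fun y => y == h)).count h
          = (t.takeWhile (fun y => y == h)).length :=
        List.count_eq_length.mpr (fun x hx => ((htw x hx) ▸ rfl))
      have h2 : (t.dropWhile (fun y => y == h)).count h = 0 :=
        List.count_eq_zero.mpr hnot
      omega
    rw [lfeGroup]
    constructor
    · intro hp
      rcases List.mem_cons.mp hp with rfl | hp
      · exact ⟨List.mem_cons_self, by simp [hcount_h]⟩
      · rcases (ih hpwdw).mp hp with ⟨hmem, hcnt⟩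
        have hne : p.1 ≠ h := fun he => hnot (he ▸ hmem)
        refine ⟨List.mem_cons_of_mem _ (hsplit ▸ List.mem_append_right _ hmem), ?_⟩
        rw [hcnt]
        congr 1
        have hcc : (h :: t).count p.1 = t.count p.1 := by
          simp [Ne.symm hne]
        rw [hcc, htsum]
        have : (t.takeWhile (fun y => y == h)).count p.1 = 0 :=
          List.count_eq_zero.mpr (fun hmem' => hne (htw _ hmem'))
        omega
    · rintro ⟨hmem, hcnt⟩
      by_cases he : p.1 = h
      · have hp2 : p = (h, ((t.takeWhile (fun y => y == h)).length : Int) + 1) := by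
          have : p.2 = ((t.takeWhile (fun y => y == h)).length : Int) + 1 := by
            rw [hcnt, he, hcount_h]; push_cast; ring
          exact Prod.ext he this
        rw [hp2]
        exact List.mem_cons_self
      · refine List.mem_cons_of_mem _ ((ih hpwdw).mpr ⟨?_, ?_⟩)
        · rcases List.mem_cons.mp hmem with h1 | h1
          · exact absurd h1 he
          · rcases List.mem_append.mp (hsplit ▸ h1) with h2 | h2
            · exact absurd (htw _ h2) he
            · exact h2
        · rw [hcnt]
          congr 1
          have hcc : (h :: t).count p.1 = t.count p.1 := by
            simp [Ne.symm he]
          rw [hcc, htsum]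
          have : (t.takeWhile (fun y => y == h)).count p.1 = 0 :=
            List.count_eq_zero.mpr (fun hmem' => he (htw _ hmem'))
          omega

-- the first components of the run-length encoding of a ≤-sorted list are strictly increasing
lemma lfeGroup_fst_lt {l : List String} (hs : l.Pairwise (· ≤ ·)) :
    (lfeGroup l).Pairwise (fun a b => a.1 < b.1) := by
  induction l using lfeGroup.induct with
  | case1 => simp [lfeGroup]
  | case2 h t ih =>
    have hpwdw : (t.dropWhile (fun y => y == h)).Pairwise (· ≤ ·) :=
      (List.pairwise_cons.mp hs).2.sublist (List.dropWhile_sublist _)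
    rw [lfeGroup]
    refine List.pairwise_cons.mpr ⟨?_, ih hpwdw⟩
    intro q hq
    have : q.1 ∈ t.dropWhile (fun y => y == h) := ((mem_lfeGroup hpwdw q).mp hq).1
    exact dropWhile_gt_head hs q.1 this

lemma lfeGroup_nodup {l : List String} (hs : l.Pairwise (· ≤ ·)) :
    (lfeGroup l).Nodup :=
  (lfeGroup_fst_lt hs).imp (fun h => fun he => absurd (he ▸ h) (lt_irrefl _))

-- ===== VERDICT (by name: the statement is the Claim_ definition above) =====
theorem letter_frequency_easy_spec : Claim_equal_letter_frequency_easy := by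
  intro lines _
  show letter_frequency_easy lines = letter_frequency_easy_alt lines
  unfold letter_frequency_easy letter_frequency_easy_alt
  set ups := lines.flatMap (fun line => ((line.toList.filter PySem.Chars.isalpha).map pvUp)) with hups
  show PySem.List.sorted2
      (lines.foldl (fun d line =>
        line.toList.foldl (fun d ch =>
          if PySem.Chars.isalpha ch then
            let k := pvUp ch
            d.insert k (d.getD k 0 + 1)
          else d) d) PySem.Dict.empty).items (fun x => -x.2) (fun x => x.1)
    = PySem.List.sorted2 (lfeGroup (PySem.List.sorted ups (fun x => x) false))
        (fun p => -p.2) (fun p => p.1)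
  rw [lfe_fold_eq_counter, hups.symm, PySem.Dict.items_counter]
  set letters := PySem.List.sorted ups (fun x => x) false with hlet
  have hsorted : letters.Pairwise (· ≤ ·) := PySem.List.sorted_pairwise ups (fun x => x) 
  apply sorted2_eq_of_perm
  have hperm : letters.Perm ups := PySem.List.sorted_perm ups (fun x => x) false
  refine (List.perm_ext_iff_of_nodup ?_ (lfeGroup_nodup hsorted)).mpr ?_
  · exact (PySem.Set.nodup_ofList ups).map
      (fun a b hab => congrArg Prod.fst hab)
  · intro p
    rw [mem_lfeGroup hsorted p]
    constructor
    · intro hp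
      rcases List.mem_map.mp hp with ⟨k, hk, hkp⟩
      have hk' : k ∈ ups := (PySem.Set.mem_ofList ups k).mp hk
      cases hkp
      exact ⟨hperm.mem_iff.mpr hk', by rw [hperm.count_eq]⟩
    · rintro ⟨hmem, hcnt⟩
      refine List.mem_map.mpr ⟨p.1, (PySem.Set.mem_ofList ups p.1).mpr (hperm.mem_iff.mp hmem), ?_⟩
      rw [← hperm.count_eq, ← hcnt]
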